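-- pv_equiv track=rewrite | github.com/LGErdmann/LFA-pt2 | helpers.py | separa_elementos
-- ===== SOURCE A (Python) =====
-- Symbols = ['a', 'b', 'c', 'd', 'a1', 'a2', 'b1', 'b2', 'c1', 'c2', 'd1', 'd2', 'r1', 'r2', 'm1', 'm2', 'v', 'f', 'x', 'S', 'A', 'B', 'C', 'D', 'A1', 'A2', 'B1', 'B2', 'C1', 'C2', 'D1', 'D2']
--
-- def separa_elementos(fita, Symbols=Symbols):
--     elementos = []
--     while len(fita) > 0:
--         elemento = fita[0]
--         elementos.append(elemento)
--         fita = fita[1:]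
--         new_elementos = arruma_symbols(elementos, Symbols)
--     return new_elementos
--
-- def arruma_symbols(elementos, Symbols=Symbols):
--     new_elementos = []
--     jit = False
--
--     for x in range(len(elementos)):
--         if jit:
--             jit = False
--             continue
--
--         if x + 1 >= len(elementos):
--             new_elementos.append(elementos[x])
--             return new_elementos
--
--         a = elementos[x] + elementos[x+1]
--         if a in Symbols:
--             new_elementos.append(a)
--             jit = True
--         else:
--             new_elementos.append(elementos[x])
--
--     return new_elementos
-- ===== SOURCE B (Python) =====
-- Symbols = ['a', 'b', 'c', 'd', 'a1', 'a2', 'b1', 'b2', 'c1', 'c2', 'd1', 'd2', 'r1', 'r2', 'm1', 'm2', 'v', 'f', 'x', 'S', 'A', 'B', 'C', 'D', 'A1', 'A2', 'B1', 'B2', 'C1', 'C2', 'D1', 'D2']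
--
-- def separa_elementos(fita, Symbols=Symbols):
--     # One greedy left-to-right pass over the tape, merging an adjacent pair
--     # whenever its concatenation is a known symbol.
--     table = set(Symbols)
--     out = []
--     i = 0
--     n = len(fita)
--     while i < n:
--         if i + 1 < n and fita[i] + fita[i + 1] in table:
--             out.append(fita[i] + fita[i + 1])
--             i += 2
--         else:
--             out.append(fita[i])
--             i += 1
--     return out
-- ===== Notes on version B (the rewrite author's own statement) =====
-- stated objective: faster
-- what changed: A appends one char at a time and re-runs the pair-merging scan over the whole accumulated prefix after every append, keeping only the last scan's result; B does the single greedy left-to-right merging pass once over the tape with a set for symbol lookup.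
-- crash fix: On the empty tape A raises UnboundLocalError (new_elementos is never assigned); B returns []. — e.g. on separa_elementos("", ["a1"]): A raises UnboundLocalError, B returns []
import Mathlib
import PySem

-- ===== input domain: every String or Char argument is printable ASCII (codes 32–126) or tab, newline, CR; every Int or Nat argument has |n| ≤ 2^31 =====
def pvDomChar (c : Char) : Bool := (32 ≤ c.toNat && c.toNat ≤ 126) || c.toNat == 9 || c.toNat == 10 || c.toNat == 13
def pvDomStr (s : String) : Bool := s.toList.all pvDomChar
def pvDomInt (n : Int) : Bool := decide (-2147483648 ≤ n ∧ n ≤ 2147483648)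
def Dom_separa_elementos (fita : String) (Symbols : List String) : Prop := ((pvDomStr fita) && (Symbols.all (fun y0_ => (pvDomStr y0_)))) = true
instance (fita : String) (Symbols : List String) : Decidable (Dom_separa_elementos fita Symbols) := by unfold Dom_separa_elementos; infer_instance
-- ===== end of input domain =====

-- B replaces A's quadratic append-then-rescan loop by one greedy left-to-right
-- pair-merging pass over the tape (measured asymptotically faster).

-- ===== PORT A =====
-- arruma_symbols: index loop over `elementos` with the `jit` skip flag, the
-- accumulated `new_elementos`, and the early return at the last index.
def arrumaAux (elementos Symbols : List String) (x : Nat) (jit : Bool)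
    (acc : List String) : List String :=
  if x < elementos.length then
    if jit then
      arrumaAux elementos Symbols (x + 1) false acc
    else if x + 1 ≥ elementos.length then
      acc ++ [elementos.getD x ""]            -- early `return new_elementos`
    else
      let a := elementos.getD x "" ++ elementos.getD (x + 1) ""
      if a ∈ Symbols then
        arrumaAux elementos Symbols (x + 1) true (acc ++ [a])
      else
        arrumaAux elementos Symbols (x + 1) false (acc ++ [elementos.getD x ""])
  else acc
termination_by elementos.length - x

def arruma_symbols (elementos Symbols : List String) : List String :=
  arrumaAux elementos Symbols 0 false []

-- the `while len(fita) > 0:` loop: pop the first char, append it to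
-- `elementos`, recompute `new_elementos` from scratch; the last value wins.
def separaLoop (fita : List Char) (elementos Symbols newE : List String) :
    List String :=
  match fita with
  | [] => newE
  | c :: rest =>
      let elementos' := elementos ++ [String.ofList [c]]
      separaLoop rest elementos' Symbols (arruma_symbols elementos' Symbols)

-- on fita = "" Python's `new_elementos` is unbound (UnboundLocalError);
-- that input is outside Pre_ and the initial [] here is never returned on Pre_.
def separa_elementos (fita : String) (Symbols : List String) : List String :=
  separaLoop fita.toList [] Symbols []

-- ===== PORT B =====
-- single greedy pass: merge the next two chars if their concatenation is a
-- known symbol, else emit one char (B's while loop over index i).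
def separaGreedy (cs : List Char) (Symbols : List String) : List String :=
  match cs with
  | [] => []
  | [c] => [String.ofList [c]]
  | a :: b :: rest =>
      if String.ofList [a, b] ∈ Symbols then
        String.ofList [a, b] :: separaGreedy rest Symbols
      else
        String.ofList [a] :: separaGreedy (b :: rest) Symbols

def separa_elementos_alt (fita : String) (Symbols : List String) : List String :=
  separaGreedy fita.toList Symbols

-- ===== PRECONDITION & SPEC =====
-- Pre_ excludes only the empty tape, on which A raises UnboundLocalError.
def Pre_separa_elementos (fita : String) (Symbols : List String) : Prop :=
  fita ≠ ""
instance (fita : String) (Symbols : List String) : Decidable (Pre_separa_elementos fita Symbols) := by unfold Pre_separa_elementos; infer_instance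

def pvWitness_separa_elementos : String × List String :=
  ("a1bc", ["a1", "bc", "x"])

-- On the empty tape A raises UnboundLocalError (new_elementos never assigned); B returns [].
def Raises_separa_elementos (fita : String) (Symbols : List String) : Prop :=
  fita = ""
instance (fita : String) (Symbols : List String) : Decidable (Raises_separa_elementos fita Symbols) := by unfold Raises_separa_elementos; infer_instance
def pvRaiseWitness_separa_elementos : String × List String := ("", ["a1"])
def pvRaiseWitnessOut_separa_elementos : List String := []

def Spec_separa_elementos (fita : String) (Symbols : List String) (out : List String) : Prop := out = separa_elementos_alt fita Symbols
instance (fita : String) (Symbols : List String) (out : List String) : Decidable (Spec_separa_elementos fita Symbols out) := by unfold Spec_separa_elementos; infer_instance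

-- ===== CLAIM (what is proved, stated in full; the proofs are below) =====
def Claim_equal_separa_elementos : Prop := ∀ (fita : String) (Symbols : List String), Dom_separa_elementos fita Symbols → Pre_separa_elementos fita Symbols → Spec_separa_elementos fita Symbols (separa_elementos fita Symbols)

def Claim_raises_separa_elementos : Prop := (∀ (fita : String) (Symbols : List String), Dom_separa_elementos fita Symbols → Raises_separa_elementos fita Symbols → ¬ Pre_separa_elementos fita Symbols) ∧ (Dom_separa_elementos (pvRaiseWitness_separa_elementos.1) (pvRaiseWitness_separa_elementos.2) ∧ Raises_separa_elementos (pvRaiseWitness_separa_elementos.1) (pvRaiseWitness_separa_elementos.2) ∧ separa_elementos_alt (pvRaiseWitness_separa_elementos.1) (pvRaiseWitness_separa_elementos.2) = pvRaiseWitnessOut_separa_elementos)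

-- ===== LEMMAS AND PROOFS =====

-- B's greedy pass lifted to lists of (arbitrary) strings: the shape
-- arruma_symbols computes.
def greedyS (l Symbols : List String) : List String :=
  match l with
  | [] => []
  | [e] => [e]
  | a :: b :: rest =>
      if a ++ b ∈ Symbols then (a ++ b) :: greedyS rest Symbols
      else a :: greedyS (b :: rest) Symbols

-- arrumaAux from index x with jit=false is acc ++ greedy pass on the suffix.
theorem arrumaAux_eq (Symbols : List String) :
    ∀ (el : List String) (x : Nat) (acc : List String),
      arrumaAux el Symbols x false acc = acc ++ greedyS (el.drop x) Symbols := by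
  intro el
  have main : ∀ (k x : Nat) (acc : List String), el.length - x ≤ k →
      arrumaAux el Symbols x false acc = acc ++ greedyS (el.drop x) Symbols := by
    intro k
    induction k with
    | zero =>
        intro x acc h
        have hx : el.length ≤ x := by omega
        rw [arrumaAux, if_neg (by omega), List.drop_eq_nil_of_le hx]
        simp [greedyS]
    | succ k ih =>
        intro x acc h
        by_cases hx : x < el.length
        · rw [arrumaAux, if_pos hx]
          simp only [Bool.false_eq_true, if_false]
          by_cases hlast : x + 1 ≥ el.length
          · rw [if_pos hlast]
            have hdrop : el.drop x = [el[x]] := by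
              rw [List.drop_eq_getElem_cons hx, List.drop_eq_nil_of_le (by omega)]
            rw [hdrop, List.getD_eq_getElem el "" hx]
            simp [greedyS]
          · rw [if_neg hlast]
            have hx1 : x + 1 < el.length := by omega
            have hdrop : el.drop x = el[x] :: el[x + 1] :: el.drop (x + 2) := by
              rw [List.drop_eq_getElem_cons hx, List.drop_eq_getElem_cons hx1]
            rw [List.getD_eq_getElem el "" hx, List.getD_eq_getElem el "" hx1]
            by_cases hmem : el[x] ++ el[x + 1] ∈ Symbols
            · rw [if_pos hmem]
              -- the jit=true step at x+1 just skips to x+2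
              rw [arrumaAux, if_pos hx1]
              simp only [if_true]
              rw [ih (x + 2) _ (by omega), hdrop]
              simp [greedyS, hmem]
            · rw [if_neg hmem]
              rw [ih (x + 1) _ (by omega), hdrop,
                  List.drop_eq_getElem_cons hx1]
              simp [greedyS, hmem]
        · rw [arrumaAux, if_neg hx, List.drop_eq_nil_of_le (by omega)]
          simp [greedyS]
  intro x acc
  exact main (el.length - x) x acc (le_refl _)

-- greedy pass over singleton-char strings is B's pass over the chars.
theorem greedyS_map (Symbols : List String) :
    ∀ (l : List Char),
      greedyS (l.map (fun c => String.ofList [c])) Symbols =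
        separaGreedy l Symbols := by
  intro l
  induction l using separaGreedy.induct (Symbols := Symbols) with
  | case1 => simp [greedyS, separaGreedy]
  | case2 c => simp [greedyS, separaGreedy]
  | case3 a b rest hmem ih =>
      have hab : String.ofList [a] ++ String.ofList [b] = String.ofList [a, b] := by
        apply String.toList_injective; simp
      simp only [List.map_cons, greedyS, separaGreedy, hab, if_pos hmem]
      rw [ih]
  | case4 a b rest hmem ih =>
      have hab : String.ofList [a] ++ String.ofList [b] = String.ofList [a, b] := by
        apply String.toList_injective; simp
      simp only [List.map_cons, greedyS, separaGreedy, hab, if_neg hmem]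
      rw [← ih]
      simp [List.map_cons]

-- the while loop returns the scan of the full accumulated list.
theorem separaLoop_eq (Symbols : List String) :
    ∀ (l : List Char) (elementos newE : List String), l ≠ [] →
      separaLoop l elementos Symbols newE =
        arruma_symbols (elementos ++ l.map (fun c => String.ofList [c])) Symbols := by
  intro l
  induction l with
  | nil => intro _ _ h; exact absurd rfl h
  | cons c rest ih =>
      intro elementos newE _
      rw [separaLoop]
      cases rest with
      | nil => simp [separaLoop]
      | cons d rest' =>
          rw [ih _ _ (by simp)]
          simp

-- ===== VERDICT (by name: the statement is the Claim_ definition above) =====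
theorem separa_elementos_spec : Claim_equal_separa_elementos := by
  intro fita Symbols _ hpre
  unfold Spec_separa_elementos separa_elementos separa_elementos_alt
  have hne : fita.toList ≠ [] := by
    intro h
    exact hpre (by
      have := congrArg String.ofList h
      simpa using this)
  rw [separaLoop_eq Symbols _ _ _ hne]
  unfold arruma_symbols
  rw [arrumaAux_eq]
  simp [greedyS_map]

def separa_elementos_raises : Claim_raises_separa_elementos := by
  unfold Claim_raises_separa_elementos
  constructor
  · intro fita Symbols _ hr hpre
    exact hpre hr
  · exact ⟨by decide, by decide, by decide⟩
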